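-- pv_equiv track=rewrite | github.com/semantic-systems/text-to-SHACL | Analysis/AnalyzeSyntaxErrors.py | extract_source_shapes_and_messages_without_details
-- ===== SOURCE A (Python) =====
-- from typing import Dict, List, Tuple, Any
--
-- def extract_source_shapes_and_messages_without_details(validation_report: str) -> Tuple[List[str], List[str]]:
--     """
--     Extracts source shapes and messages from a SHACL validation report,
--     excluding any content found within "Details:" blocks.
--
--     :param validation_report: The raw SHACL validation report as a string.
--     :return: A tuple containing two lists: source shapes and messages.
--     """
--     lines = validation_report.splitlines()
--     results = []
--     current_result = {}
--     in_details_block = False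
--
--     for line in lines:
--         stripped = line.strip()
--
--         # Start or end of a details block
--         if stripped.startswith("Details:"):
--             in_details_block = True
--             continue
--         elif in_details_block:
--             # If indentation is less than "Details:" sub-block, flag exit
--             if not line.startswith("\t") and not line.startswith(" " * 4):
--                 in_details_block = False
--             # Otherwise, we are still in the details block
--             else:
--                 continue
--
--         if not in_details_block:
--             if stripped.startswith("Source Shape:"):
--                 current_result["source_shape"] = stripped.replace("Source Shape:", "").strip()
--             elif stripped.startswith("Message:"):
--                 current_result["message"] = stripped.replace("Message:", "").strip()
--                 results.append(current_result)
--                 current_result = {}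
--
--     return results
-- ===== SOURCE B (Python) =====
-- def extract_source_shapes_and_messages_without_details(validation_report: str):
--     # Pass 1: the details-block state machine alone, producing the lines that reach parsing.
--     kept = []
--     in_details_block = False
--     for line in validation_report.splitlines():
--         if line.strip().startswith("Details:"):
--             in_details_block = True
--         elif in_details_block and (line.startswith("\t") or line.startswith(" " * 4)):
--             pass  # still inside the details block
--         else:
--             in_details_block = False
--             kept.append(line)
--     # Pass 2: parse source shapes and messages from the surviving lines.
--     results = []
--     current_result = {}
--     for line in kept:
--         stripped = line.strip()
--         if stripped.startswith("Source Shape:"):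
--             current_result["source_shape"] = stripped.replace("Source Shape:", "").strip()
--         elif stripped.startswith("Message:"):
--             current_result["message"] = stripped.replace("Message:", "").strip()
--             results.append(current_result)
--             current_result = {}
--     return results
-- ===== Notes on version B (the rewrite author's own statement) =====
-- stated objective: alternative
-- what changed: A's single loop interleaving the details-block state machine with parsing is split into two passes: pass 1 runs only the state machine and filters out details-block lines, pass 2 parses Source Shape/Message from the surviving lines.
import Mathlib
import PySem

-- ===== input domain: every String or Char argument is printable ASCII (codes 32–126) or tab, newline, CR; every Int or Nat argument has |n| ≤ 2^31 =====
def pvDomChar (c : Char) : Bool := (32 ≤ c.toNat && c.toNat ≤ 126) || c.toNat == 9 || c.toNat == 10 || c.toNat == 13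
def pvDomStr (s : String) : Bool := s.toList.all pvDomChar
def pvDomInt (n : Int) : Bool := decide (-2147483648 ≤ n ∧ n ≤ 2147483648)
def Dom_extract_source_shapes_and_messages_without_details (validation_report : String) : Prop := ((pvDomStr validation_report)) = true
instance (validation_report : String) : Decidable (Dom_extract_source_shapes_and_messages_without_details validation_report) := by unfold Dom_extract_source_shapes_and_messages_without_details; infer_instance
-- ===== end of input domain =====

-- B re-decomposes A's single stateful loop into two passes — first the details-block
-- state machine filtering the lines, then a plain parse of the surviving lines (objective: simpler decomposition, same cost).

-- ===== PORT A =====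
-- A's loop body: state = (results, current_result, in_details_block)
def pvStepA (st : List (List (String × String)) × PySem.Dict String String × Bool)
    (line : String) : List (List (String × String)) × PySem.Dict String String × Bool :=
  let stripped := PySem.Str.strip line
  if PySem.Str.startswith stripped "Details:" then
    (st.1, st.2.1, true)                      -- start of a details block; continue
  else if st.2.2 && (PySem.Str.startswith line "\t" || PySem.Str.startswith line "    ") then
    (st.1, st.2.1, true)                      -- still in the details block; continue
  else
    -- in_details_block is (now) False: parse the line
    if PySem.Str.startswith stripped "Source Shape:" then
      (st.1, st.2.1.insert "source_shape" (PySem.Str.strip (PySem.Str.replace stripped "Source Shape:" "")), false)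
    else if PySem.Str.startswith stripped "Message:" then
      (st.1 ++ [(st.2.1.insert "message" (PySem.Str.strip (PySem.Str.replace stripped "Message:" ""))).items],
       PySem.Dict.empty, false)
    else (st.1, st.2.1, false)

def extract_source_shapes_and_messages_without_details (validation_report : String) : List (List (String × String)) :=
  let lines := PySem.Str.splitlines validation_report
  ((lines.foldl pvStepA ([], PySem.Dict.empty, false))).1

-- ===== PORT B =====
-- B pass 1 body: the details-block state machine alone; state = (kept, in_details_block)
def pvStepB1 (st : List String × Bool) (line : String) : List String × Bool :=
  if PySem.Str.startswith (PySem.Str.strip line) "Details:" then (st.1, true)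
  else if st.2 && (PySem.Str.startswith line "\t" || PySem.Str.startswith line "    ") then st
  else (st.1 ++ [line], false)

-- B pass 2 body: parse the surviving lines; state = (results, current_result)
def pvStepB2 (st : List (List (String × String)) × PySem.Dict String String)
    (line : String) : List (List (String × String)) × PySem.Dict String String :=
  let stripped := PySem.Str.strip line
  if PySem.Str.startswith stripped "Source Shape:" then
    (st.1, st.2.insert "source_shape" (PySem.Str.strip (PySem.Str.replace stripped "Source Shape:" "")))
  else if PySem.Str.startswith stripped "Message:" then
    (st.1 ++ [(st.2.insert "message" (PySem.Str.strip (PySem.Str.replace stripped "Message:" ""))).items],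
     PySem.Dict.empty)
  else st

def extract_source_shapes_and_messages_without_details_alt (validation_report : String) : List (List (String × String)) :=
  let kept := ((PySem.Str.splitlines validation_report).foldl pvStepB1 ([], false)).1
  (kept.foldl pvStepB2 ([], PySem.Dict.empty)).1

-- ===== PRECONDITION & SPEC =====
def Spec_extract_source_shapes_and_messages_without_details (validation_report : String) (out : List (List (String × String))) : Prop := out = extract_source_shapes_and_messages_without_details_alt validation_report
instance (validation_report : String) (out : List (List (String × String))) : Decidable (Spec_extract_source_shapes_and_messages_without_details validation_report out) := by unfold Spec_extract_source_shapes_and_messages_without_details; infer_instance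

-- ===== CLAIM (what is proved, stated in full; the proofs are below) =====
def Claim_equal_extract_source_shapes_and_messages_without_details : Prop := ∀ (validation_report : String), Dom_extract_source_shapes_and_messages_without_details validation_report → Spec_extract_source_shapes_and_messages_without_details validation_report (extract_source_shapes_and_messages_without_details validation_report)

-- ===== LEMMAS AND PROOFS =====

-- the list of lines B's pass 1 keeps, as a structural recursion (proof-only)
def pvKept (b : Bool) : List String → List String
  | [] => []
  | l :: ls =>
    if PySem.Str.startswith (PySem.Str.strip l) "Details:" then pvKept true ls
    else if b && (PySem.Str.startswith l "\t" || PySem.Str.startswith l "    ") then pvKept b ls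
    else l :: pvKept false ls

theorem pvStepB1_foldl (ls : List String) (acc : List String) (b : Bool) :
    (ls.foldl pvStepB1 (acc, b)).1 = acc ++ pvKept b ls := by
  induction ls generalizing acc b with
  | nil => simp [pvKept]
  | cons l ls ih =>
    simp only [List.foldl_cons, pvStepB1, pvKept]
    split_ifs with h1 h2 <;> simp [ih]

theorem pvFusion (ls : List String) (res : List (List (String × String)))
    (cur : PySem.Dict String String) (b : Bool) :
    (ls.foldl pvStepA (res, cur, b)).1 = ((pvKept b ls).foldl pvStepB2 (res, cur)).1 := by
  induction ls generalizing res cur b with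
  | nil => simp [pvKept]
  | cons l ls ih =>
    simp only [List.foldl_cons, pvStepA, pvKept]
    split_ifs with h1 h2 h3 h4
    · exact ih res cur true
    · simp only [Bool.and_eq_true] at h2
      rw [h2.1]; exact ih res cur true
    · simp only [List.foldl_cons, pvStepB2]
      simp only [h3, if_true]
      exact ih _ _ false
    · simp only [List.foldl_cons, pvStepB2]
      simp only [h3, h4, if_true]
      exact ih _ _ false
    · simp only [List.foldl_cons, pvStepB2]
      simp only [h3, h4]
      exact ih _ _ false

-- ===== VERDICT (by name: the statement is the Claim_ definition above) =====
theorem extract_source_shapes_and_messages_without_details_spec : Claim_equal_extract_source_shapes_and_messages_without_details := by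
  intro vr _
  unfold Spec_extract_source_shapes_and_messages_without_details
  unfold extract_source_shapes_and_messages_without_details
  unfold extract_source_shapes_and_messages_without_details_alt
  rw [pvFusion, pvStepB1_foldl]
  simp
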